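-- pv_equiv track=rewrite | github.com/tahosook/dining-memory-app | scripts/explore-food-labels.py | prioritize_primary_candidate
-- ===== SOURCE A (Python) =====
-- from typing import Any, Dict, Iterator, List, Optional, Sequence, Tuple
--
-- def prioritize_primary_candidate(
--     candidates: Sequence[Dict[str, Any]],
--     primary_dish_key: str,
-- ) -> List[Dict[str, Any]]:
--     prioritized: List[Dict[str, Any]] = []
--     seen = set()
--     for candidate in candidates:
--         if candidate["key"] == primary_dish_key and candidate["key"] not in seen:
--             prioritized.append(candidate)
--             seen.add(candidate["key"])
--     for candidate in candidates:
--         if candidate["key"] in seen: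
--             continue
--         prioritized.append(candidate)
--         seen.add(candidate["key"])
--     return prioritized
-- ===== SOURCE B (Python) =====
-- def prioritize_primary_candidate(candidates, primary_dish_key):
--     by_key = {}
--     for candidate in candidates:
--         by_key.setdefault(candidate["key"], candidate)
--     primary = by_key.get(primary_dish_key)
--     rest = [c for k, c in by_key.items() if k != primary_dish_key]
--     return ([primary] if primary is not None else []) + rest
-- ===== Notes on version B (the rewrite author's own statement) =====
-- stated objective: simpler
-- what changed: A makes two filtered passes over candidates with a side 'seen' set; B builds one first-occurrence dict in a single pass and then just reorders its values, putting the primary entry first.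
import Mathlib
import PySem

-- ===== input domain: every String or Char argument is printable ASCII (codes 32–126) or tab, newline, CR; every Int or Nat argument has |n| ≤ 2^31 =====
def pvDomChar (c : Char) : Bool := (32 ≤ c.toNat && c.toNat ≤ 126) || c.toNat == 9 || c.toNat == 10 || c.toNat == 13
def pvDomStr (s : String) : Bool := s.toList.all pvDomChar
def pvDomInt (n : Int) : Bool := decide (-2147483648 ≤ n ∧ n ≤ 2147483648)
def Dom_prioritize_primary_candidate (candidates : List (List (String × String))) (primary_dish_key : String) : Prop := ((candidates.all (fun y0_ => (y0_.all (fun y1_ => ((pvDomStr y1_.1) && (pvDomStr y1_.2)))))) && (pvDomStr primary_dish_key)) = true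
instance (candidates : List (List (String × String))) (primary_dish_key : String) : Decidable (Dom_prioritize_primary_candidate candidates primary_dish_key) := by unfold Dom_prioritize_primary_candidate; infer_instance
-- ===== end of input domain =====

-- B replaces A's two filtered passes + seen-set with one first-occurrence dict pass and a reorder (objective: simpler).

-- ===== PORT A =====
-- candidate["key"]: first match in the association list (exact: a Python dict has unique keys).
-- Total form returning "" where the key is absent; Pre_ excludes that case (Python raises KeyError).
def pvKey (c : List (String × String)) : String :=
  ((c.find? (fun e => e.1 == "key")).map Prod.snd).getD ""

-- first loop of A: append the (first) candidate whose key equals primary_dish_key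
def pvALoop1 (candidates : List (List (String × String))) (p : String)
    (st : List (List (String × String)) × PySem.Set String) :
    List (List (String × String)) × PySem.Set String :=
  match candidates with
  | [] => st
  | c :: rest =>
    if pvKey c == p && !(PySem.Set.contains st.2 (pvKey c)) then
      pvALoop1 rest p (st.1 ++ [c], PySem.Set.add st.2 (pvKey c))
    else
      pvALoop1 rest p st

-- second loop of A: append every candidate whose key was not seen yet
def pvALoop2 (candidates : List (List (String × String)))
    (st : List (List (String × String)) × PySem.Set String) :
    List (List (String × String)) × PySem.Set String :=
  match candidates with
  | [] => st
  | c :: rest =>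
    if PySem.Set.contains st.2 (pvKey c) then pvALoop2 rest st
    else pvALoop2 rest (st.1 ++ [c], PySem.Set.add st.2 (pvKey c))

def prioritize_primary_candidate (candidates : List (List (String × String))) (primary_dish_key : String) : List (List (String × String)) :=
  (pvALoop2 candidates (pvALoop1 candidates primary_dish_key ([], PySem.Set.empty))).1

-- ===== PORT B =====
-- by_key.setdefault(candidate["key"], candidate) in a single pass
def pvBIndex (candidates : List (List (String × String)))
    (d : PySem.Dict String (List (String × String))) :
    PySem.Dict String (List (String × String)) :=
  match candidates with
  | [] => d
  | c :: rest => pvBIndex rest (d.setdefault (pvKey c) c)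

def prioritize_primary_candidate_alt (candidates : List (List (String × String))) (primary_dish_key : String) : List (List (String × String)) :=
  let by_key := pvBIndex candidates PySem.Dict.empty
  let rest := (by_key.items.filter (fun e => e.1 != primary_dish_key)).map Prod.snd
  match by_key.get? primary_dish_key with
  | some c => c :: rest
  | none => rest

-- ===== PRECONDITION & SPEC =====
-- Pre_ excludes candidates without a "key" entry: there A (and B) raise KeyError.
def Pre_prioritize_primary_candidate (candidates : List (List (String × String))) (primary_dish_key : String) : Prop :=
  candidates.all (fun c => c.any (fun e => e.1 == "key")) = true
instance (candidates : List (List (String × String))) (primary_dish_key : String) : Decidable (Pre_prioritize_primary_candidate candidates primary_dish_key) := by unfold Pre_prioritize_primary_candidate; infer_instance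

def pvWitness_prioritize_primary_candidate : (List (List (String × String))) × String :=
  ([[("key", "soup"), ("name", "Soup")], [("key", "rice")], [("key", "soup"), ("x", "1")]], "rice")

def Spec_prioritize_primary_candidate (candidates : List (List (String × String))) (primary_dish_key : String) (out : List (List (String × String))) : Prop := out = prioritize_primary_candidate_alt candidates primary_dish_key
instance (candidates : List (List (String × String))) (primary_dish_key : String) (out : List (List (String × String))) : Decidable (Spec_prioritize_primary_candidate candidates primary_dish_key out) := by unfold Spec_prioritize_primary_candidate; infer_instance

-- ===== CLAIM (what is proved, stated in full; the proofs are below) =====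
def Claim_equal_prioritize_primary_candidate : Prop := ∀ (candidates : List (List (String × String))) (primary_dish_key : String), Dom_prioritize_primary_candidate candidates primary_dish_key → Pre_prioritize_primary_candidate candidates primary_dish_key → Spec_prioritize_primary_candidate candidates primary_dish_key (prioritize_primary_candidate candidates primary_dish_key)

-- ===== LEMMAS AND PROOFS =====

-- canonical first-occurrence list: the shape both ports reduce to
def pvCanon (candidates : List (List (String × String))) (s : PySem.Set String) :
    List (String × List (String × String)) :=
  match candidates with
  | [] => []
  | c :: rest =>
    if PySem.Set.contains s (pvKey c) then pvCanon rest s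
    else (pvKey c, c) :: pvCanon rest (PySem.Set.add s (pvKey c))

theorem pvContains_of_mem (s : PySem.Set String) (x : String) (h : x ∈ s) :
    PySem.Set.contains s x = true := by
  simp [PySem.Set.contains, h]

theorem pvContains_of_not_mem (s : PySem.Set String) (x : String) (h : x ∉ s) :
    ¬ (PySem.Set.contains s x = true) := by
  simp [PySem.Set.contains, h]

theorem pvCanon_congr (candidates : List (List (String × String)))
    (s s' : PySem.Set String) (h : ∀ k, k ∈ s ↔ k ∈ s') :
    pvCanon candidates s = pvCanon candidates s' := by
  induction candidates generalizing s s' with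
  | nil => rfl
  | cons c rest ih =>
    simp only [pvCanon]
    by_cases hm : pvKey c ∈ s
    · rw [if_pos (pvContains_of_mem _ _ hm),
        if_pos (pvContains_of_mem _ _ ((h _).1 hm)), ih s s' h]
    · rw [if_neg (pvContains_of_not_mem _ _ hm),
        if_neg (pvContains_of_not_mem _ _ (fun hx => hm ((h _).2 hx))),
        ih (s.add (pvKey c)) (s'.add (pvKey c))
          (fun k => by rw [PySem.Set.mem_add, PySem.Set.mem_add, h k])]

theorem pvALoop2_eq (candidates : List (List (String × String)))
    (st : List (List (String × String)) × PySem.Set String) :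
    (pvALoop2 candidates st).1 = st.1 ++ (pvCanon candidates st.2).map Prod.snd := by
  induction candidates generalizing st with
  | nil => simp [pvALoop2, pvCanon]
  | cons c rest ih =>
    simp only [pvALoop2, pvCanon]
    by_cases h : pvKey c ∈ st.2
    · rw [if_pos (pvContains_of_mem _ _ h), if_pos (pvContains_of_mem _ _ h), ih]
    · rw [if_neg (pvContains_of_not_mem _ _ h),
        if_neg (pvContains_of_not_mem _ _ h), ih]
      simp

theorem pvALoop1_of_contains (candidates : List (List (String × String))) (p : String)
    (st : List (List (String × String)) × PySem.Set String)
    (h : p ∈ st.2) :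
    pvALoop1 candidates p st = st := by
  induction candidates generalizing st with
  | nil => rfl
  | cons c rest ih =>
    simp only [pvALoop1]
    by_cases hk : pvKey c = p
    · rw [if_neg (by simp [PySem.Set.contains, hk, h])]
      exact ih _ h
    · rw [if_neg (by simp [beq_eq_false_iff_ne.mpr hk])]
      exact ih _ h

theorem pvALoop1_of_not_contains (candidates : List (List (String × String))) (p : String)
    (acc : List (List (String × String))) (s : PySem.Set String)
    (h : p ∉ s) :
    pvALoop1 candidates p (acc, s) =
      match candidates.find? (fun c => pvKey c == p) with
      | some c => (acc ++ [c], PySem.Set.add s p)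
      | none => (acc, s) := by
  induction candidates generalizing acc with
  | nil => rfl
  | cons c rest ih =>
    simp only [pvALoop1, List.find?]
    by_cases hk : pvKey c = p
    · have hmem : p ∈ PySem.Set.add s p := by rw [PySem.Set.mem_add]; right; rfl
      rw [beq_iff_eq.mpr hk,
        if_pos (by simp [PySem.Set.contains, hk, h])]
      exact hk ▸ pvALoop1_of_contains rest p _ (hk ▸ hmem)
    · rw [beq_eq_false_iff_ne.mpr hk, if_neg (by simp)]
      exact ih acc

theorem pvBIndex_items (candidates : List (List (String × String)))
    (d : PySem.Dict String (List (String × String))) (s : PySem.Set String)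
    (hs : ∀ k, k ∈ s ↔ d.contains k = true) :
    (pvBIndex candidates d).items = d.items ++ pvCanon candidates s := by
  induction candidates generalizing d s with
  | nil => simp [pvBIndex, pvCanon]
  | cons c rest ih =>
    simp only [pvBIndex, pvCanon]
    by_cases h : pvKey c ∈ s
    · rw [PySem.Dict.setdefault_of_contains _ _ ((hs _).1 h),
        if_pos (pvContains_of_mem _ _ h), ih d s hs]
    · have hd : d.contains (pvKey c) = false := by
        cases hx : d.contains (pvKey c)
        · rfl
        · exact absurd ((hs _).2 hx) h
      rw [PySem.Dict.setdefault_of_not_contains _ _ hd,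
        if_neg (pvContains_of_not_mem _ _ h),
        ih (d.insert (pvKey c) c) (PySem.Set.add s (pvKey c))
          (fun k => by
            rw [PySem.Set.mem_add, PySem.Dict.contains_insert, Bool.or_eq_true,
              beq_iff_eq, ← hs k]
            tauto),
        PySem.Dict.items_insert_of_not_contains _ _ hd]
      simp

theorem pvBIndex_get?_of_some (candidates : List (List (String × String)))
    (d : PySem.Dict String (List (String × String))) (p : String)
    (v : List (String × String)) (hd : d.get? p = some v) :
    (pvBIndex candidates d).get? p = some v := by
  induction candidates generalizing d with
  | nil => simpa [pvBIndex] using hd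
  | cons c rest ih =>
    simp only [pvBIndex]
    by_cases hc : d.contains (pvKey c) = true
    · rw [PySem.Dict.setdefault_of_contains _ _ hc]; exact ih d hd
    · rw [PySem.Dict.setdefault_of_not_contains _ _ (by simpa using hc)]
      apply ih
      have hne : p ≠ pvKey c := by
        intro he
        rw [PySem.Dict.contains_eq_isSome_get?, ← he, hd] at hc
        simp at hc
      rw [PySem.Dict.get?_insert_of_ne _ _ hne]
      exact hd

theorem pvBIndex_get? (candidates : List (List (String × String)))
    (d : PySem.Dict String (List (String × String))) (p : String)
    (hd : d.get? p = none) :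
    (pvBIndex candidates d).get? p = candidates.find? (fun c => pvKey c == p) := by
  induction candidates generalizing d with
  | nil => simpa [pvBIndex]
  | cons c rest ih =>
    simp only [pvBIndex, List.find?]
    by_cases hc : d.contains (pvKey c) = true
    · rw [PySem.Dict.setdefault_of_contains _ _ hc]
      have hk : (pvKey c == p) = false := by
        apply beq_eq_false_iff_ne.mpr
        intro he
        rw [PySem.Dict.contains_eq_isSome_get?, he, hd] at hc
        simp at hc
      rw [hk]
      exact ih d hd
    · rw [PySem.Dict.setdefault_of_not_contains _ _ (by simpa using hc)]
      by_cases hk : pvKey c = p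
      · subst hk
        simp only [beq_self_eq_true]
        exact pvBIndex_get?_of_some rest _ _ _ (PySem.Dict.get?_insert_self ..)
      · rw [beq_eq_false_iff_ne.mpr hk]
        apply ih
        rw [PySem.Dict.get?_insert_of_ne _ _ (fun he => hk he.symm)]
        exact hd

theorem pvCanon_mem (candidates : List (List (String × String))) (s : PySem.Set String)
    (e : String × List (String × String)) (he : e ∈ pvCanon candidates s) :
    e.1 = pvKey e.2 ∧ e.2 ∈ candidates := by
  induction candidates generalizing s with
  | nil => simp [pvCanon] at he
  | cons c rest ih =>
    simp only [pvCanon] at he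
    by_cases h : PySem.Set.contains s (pvKey c) = true
    · rw [if_pos h] at he
      obtain ⟨h1, h2⟩ := ih _ he
      exact ⟨h1, List.mem_cons_of_mem _ h2⟩
    · rw [if_neg h] at he
      rcases List.mem_cons.1 he with h1 | h1
      · subst h1; exact ⟨rfl, List.mem_cons_self ..⟩
      · obtain ⟨h1, h2⟩ := ih _ h1
        exact ⟨h1, List.mem_cons_of_mem _ h2⟩

-- a key already in the seen-set never appears among pvCanon's entries
theorem pvCanon_key_not_mem (candidates : List (List (String × String)))
    (s : PySem.Set String) (p : String) (hp : p ∈ s)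
    (e : String × List (String × String)) (he : e ∈ pvCanon candidates s) :
    e.1 ≠ p := by
  induction candidates generalizing s with
  | nil => simp [pvCanon] at he
  | cons c rest ih =>
    simp only [pvCanon] at he
    by_cases h : pvKey c ∈ s
    · rw [if_pos (pvContains_of_mem _ _ h)] at he
      exact ih s hp he
    · rw [if_neg (pvContains_of_not_mem _ _ h)] at he
      rcases List.mem_cons.1 he with h1 | h1
      · subst h1
        intro hx
        exact h (by rw [show pvKey c = p from hx]; exact hp)
      · exact ih (s.add (pvKey c)) (by rw [PySem.Set.mem_add]; left; exact hp) h1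

theorem pvCanon_filter_of_mem (candidates : List (List (String × String)))
    (s : PySem.Set String) (p : String) (h : p ∈ s) :
    (pvCanon candidates s).filter (fun e => e.1 != p) = pvCanon candidates s := by
  apply List.filter_eq_self.mpr
  intro e he
  simpa using pvCanon_key_not_mem candidates s p h e he

theorem pvCanon_add (candidates : List (List (String × String)))
    (s : PySem.Set String) (p : String) :
    pvCanon candidates (PySem.Set.add s p) = (pvCanon candidates s).filter (fun e => e.1 != p) := by
  induction candidates generalizing s with
  | nil => simp [pvCanon]
  | cons c rest ih =>
    simp only [pvCanon]
    by_cases hc : pvKey c ∈ s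
    · have hm : pvKey c ∈ PySem.Set.add s p := by rw [PySem.Set.mem_add]; left; exact hc
      rw [if_pos (pvContains_of_mem _ _ hm), if_pos (pvContains_of_mem _ _ hc)]
      exact ih s
    · by_cases hk : pvKey c = p
      · have hm : pvKey c ∈ PySem.Set.add s p := by rw [PySem.Set.mem_add]; right; exact hk
        rw [if_pos (pvContains_of_mem _ _ hm),
          if_neg (pvContains_of_not_mem _ _ hc), List.filter_cons,
          if_neg (by simp [hk]), hk,
          pvCanon_filter_of_mem rest (PySem.Set.add s p) p
            (by rw [PySem.Set.mem_add]; right; rfl)]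
      · have hnm : pvKey c ∉ PySem.Set.add s p := by
          rw [PySem.Set.mem_add]; rintro (h1 | h1); exacts [hc h1, hk h1]
        rw [if_neg (pvContains_of_not_mem _ _ hnm),
          if_neg (pvContains_of_not_mem _ _ hc), List.filter_cons,
          if_pos (by simpa using hk)]
        congr 1
        rw [pvCanon_congr rest ((PySem.Set.add s p).add (pvKey c)) ((PySem.Set.add s (pvKey c)).add p)
          (fun k => by
            rw [PySem.Set.mem_add, PySem.Set.mem_add, PySem.Set.mem_add, PySem.Set.mem_add]
            tauto)]
        exact ih (PySem.Set.add s (pvKey c))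

-- ===== VERDICT (by name: the statement is the Claim_ definition above) =====
theorem prioritize_primary_candidate_spec : Claim_equal_prioritize_primary_candidate := by
  intro candidates p _ _
  unfold Spec_prioritize_primary_candidate
  unfold prioritize_primary_candidate prioritize_primary_candidate_alt
  have hempty : ∀ k : String, k ∈ (PySem.Set.empty : PySem.Set String) ↔ (PySem.Dict.empty : PySem.Dict String (List (String × String))).contains k = true := by
    intro k
    simp [PySem.Set.empty, PySem.Dict.contains_empty]
  have hitems := pvBIndex_items candidates PySem.Dict.empty PySem.Set.empty hempty
  have hie : (PySem.Dict.empty : PySem.Dict String (List (String × String))).items = [] := rfl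
  rw [hie] at hitems
  have hget := pvBIndex_get? candidates PySem.Dict.empty p (PySem.Dict.get?_empty p)
  rw [pvALoop2_eq,
    pvALoop1_of_not_contains candidates p [] PySem.Set.empty (by simp [PySem.Set.empty])]
  cases hfind : candidates.find? (fun c => pvKey c == p) with
  | none =>
    rw [hfind] at hget
    simp only [hget, hitems]
    have hfilter : ((pvCanon candidates PySem.Set.empty).filter (fun e => e.1 != p)) = pvCanon candidates PySem.Set.empty := by
      apply List.filter_eq_self.mpr
      intro e he
      obtain ⟨h1, h2⟩ := pvCanon_mem _ _ _ he
      have := List.find?_eq_none.mp hfind e.2 h2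
      rw [← h1] at this
      simpa using this
    simp only [PySem.Set.empty, List.nil_append] at hfilter ⊢
    rw [hfilter]
  | some c0 =>
    rw [hfind] at hget
    simp only [hget, hitems, pvCanon_add]
    simp [PySem.Set.empty]
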